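-- pv_equiv track=rewrite | github.com/Polyxide/LeetCode | kyu(8&7)/pickaxe.py | stone_pickk
-- ===== SOURCE A (Python) =====
-- def stone_pickk(arr):
--
--     sticks_counter = 0
--     stones_counter = 0
--     result = 0
--
--     for x in arr:
--
--         if x == 'Sticks':
--             sticks_counter += 1
--
--         elif x == 'Cobblestone':
--             stones_counter += 1
--
--         elif x == 'Wood':
--             sticks_counter += 4
--
--         else:
--             pass
--
--     while sticks_counter >= 2 and stones_counter >= 3:
--         result += 1
--         sticks_counter -= 2
--         stones_counter -= 3
--
--     return result
-- ===== SOURCE B (Python) =====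
-- def stone_pickk(arr):
--     sticks = arr.count('Sticks') + 4 * arr.count('Wood')
--     stones = arr.count('Cobblestone')
--     return min(sticks // 2, stones // 3)
-- ===== Notes on version B (the rewrite author's own statement) =====
-- stated objective: simpler
-- what changed: Replaces the repeated-subtraction while loop with the closed form min(sticks//2, stones//3) computed from list.count calls instead of an explicit counting loop.
import Mathlib
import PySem

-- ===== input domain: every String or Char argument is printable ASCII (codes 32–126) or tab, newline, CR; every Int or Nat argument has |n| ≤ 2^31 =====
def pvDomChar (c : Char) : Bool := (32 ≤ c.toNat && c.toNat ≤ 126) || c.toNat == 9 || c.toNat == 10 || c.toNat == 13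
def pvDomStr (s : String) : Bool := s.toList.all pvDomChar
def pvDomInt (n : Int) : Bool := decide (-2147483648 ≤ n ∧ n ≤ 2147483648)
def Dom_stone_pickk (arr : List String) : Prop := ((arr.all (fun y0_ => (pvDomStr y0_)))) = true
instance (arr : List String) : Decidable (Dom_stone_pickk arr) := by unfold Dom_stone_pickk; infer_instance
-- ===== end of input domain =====

-- B replaces A's repeated-subtraction while loop with the closed form min(sticks//2, stones//3) (simpler).

-- ===== PORT A =====
-- the while loop of A: repeatedly craft one pickaxe while materials suffice
def stone_pickk_loop (sticks stones result : Int) : Int :=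
  if sticks ≥ 2 ∧ stones ≥ 3 then
    stone_pickk_loop (sticks - 2) (stones - 3) (result + 1)
  else
    result
termination_by sticks.toNat
decreasing_by omega

def stone_pickk (arr : List String) : Int :=
  let st := arr.foldl (fun (acc : Int × Int) x =>
    if x == "Sticks" then (acc.1 + 1, acc.2)
    else if x == "Cobblestone" then (acc.1, acc.2 + 1)
    else if x == "Wood" then (acc.1 + 4, acc.2)
    else acc) (0, 0)
  stone_pickk_loop st.1 st.2 0

-- ===== PORT B =====
def stone_pickk_alt (arr : List String) : Int :=
  let sticks : Int := (arr.count "Sticks" : Int) + 4 * (arr.count "Wood" : Int)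
  let stones : Int := (arr.count "Cobblestone" : Int)
  min (PySem.Int.floordiv sticks 2) (PySem.Int.floordiv stones 3)

-- ===== PRECONDITION & SPEC =====
def Spec_stone_pickk (arr : List String) (out : Int) : Prop := out = stone_pickk_alt arr
instance (arr : List String) (out : Int) : Decidable (Spec_stone_pickk arr out) := by unfold Spec_stone_pickk; infer_instance

-- ===== CLAIM (what is proved, stated in full; the proofs are below) =====
def Claim_equal_stone_pickk : Prop := ∀ (arr : List String), Dom_stone_pickk arr → Spec_stone_pickk arr (stone_pickk arr)

-- ===== LEMMAS AND PROOFS =====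

-- the while loop computes result + min(sticks//2, stones//3) for nonnegative counters
theorem stone_pickk_loop_eq (s t r : Int) (hs : 0 ≤ s) (ht : 0 ≤ t) :
    stone_pickk_loop s t r = r + min (s / 2) (t / 3) := by
  rw [stone_pickk_loop]
  split
  · rename_i h
    rw [stone_pickk_loop_eq (s - 2) (t - 3) (r + 1) (by omega) (by omega)]
    rcases le_total (s / 2) (t / 3) with h' | h' <;>
      rcases le_total ((s - 2) / 2) ((t - 3) / 3) with h'' | h'' <;>
        simp [h', h''] <;> omega
  · rename_i h
    have : min (s / 2) (t / 3) = 0 := by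
      rcases le_total (s / 2) (t / 3) with h' | h' <;>
        simp [h'] <;> omega
    omega
termination_by s.toNat
decreasing_by omega

-- the counting fold equals the two weighted counts
theorem stone_pickk_fold_eq (arr : List String) (a b : Int) :
    arr.foldl (fun (acc : Int × Int) x =>
      if x == "Sticks" then (acc.1 + 1, acc.2)
      else if x == "Cobblestone" then (acc.1, acc.2 + 1)
      else if x == "Wood" then (acc.1 + 4, acc.2)
      else acc) (a, b) =
    (a + (arr.count "Sticks" : Int) + 4 * (arr.count "Wood" : Int),
     b + (arr.count "Cobblestone" : Int)) := by
  induction arr generalizing a b with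
  | nil => simp
  | cons x xs ih =>
    simp only [beq_iff_eq] at ih ⊢
    simp only [List.foldl_cons]
    by_cases h1 : x = "Sticks"
    · rw [if_pos h1, ih]
      simp [Prod.ext_iff, h1]
      ring
    · by_cases h2 : x = "Cobblestone"
      · rw [if_neg h1, if_pos h2, ih]
        simp [Prod.ext_iff, h2]
        ring
      · by_cases h3 : x = "Wood"
        · rw [if_neg h1, if_neg h2, if_pos h3, ih]
          simp [Prod.ext_iff, h3]
          ring
        · rw [if_neg h1, if_neg h2, if_neg h3, ih]
          simp [h1, h2, h3]

-- ===== VERDICT (by name: the statement is the Claim_ definition above) =====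
theorem stone_pickk_spec : Claim_equal_stone_pickk := by
  intro arr _
  unfold Spec_stone_pickk stone_pickk stone_pickk_alt
  rw [stone_pickk_fold_eq]
  simp only []
  rw [stone_pickk_loop_eq _ _ _ (by positivity) (by positivity)]
  rw [PySem.Int.floordiv_eq_ediv_of_pos (by omega), PySem.Int.floordiv_eq_ediv_of_pos (by omega)]
  ring_nf
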